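-- pv_equiv track=rewrite | github.com/newbieeashish/LeetCode_Algo | 1st_100_questions/CompareStringFrequencyOfSmallestCharacter.py | CompareStringFreqOfSmallestCharacter
-- ===== SOURCE A (Python) =====
-- def CompareStringFreqOfSmallestCharacter(queries, words):
--     query_freqs = [s.count(min(s)) for s in queries]
--     word_freqs = [s.count(min(s)) for s in words]
--
--     result = [0] * len(query_freqs)
--     for i,q in enumerate(query_freqs):
--         for w in word_freqs:
--             if q < w:
--                 result[i] += 1
--
--     return result
-- ===== SOURCE B (Python) =====
-- def _min_freq(s):
--     return s.count(min(s))
--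
-- def _bisect_right(a, x):
--     lo, hi = 0, len(a)
--     while lo < hi:
--         mid = (lo + hi) // 2
--         if x < a[mid]:
--             hi = mid
--         else:
--             lo = mid + 1
--     return lo
--
-- def CompareStringFreqOfSmallestCharacter(queries, words):
--     word_freqs = sorted(_min_freq(w) for w in words)
--     n = len(word_freqs)
--     result = []
--     for s in queries:
--         result.append(n - _bisect_right(word_freqs, _min_freq(s)))
--     return result
-- ===== Notes on version B (the rewrite author's own statement) =====
-- stated objective: faster
-- what changed: Instead of scanning all word frequencies for every query (nested loops), B sorts the word frequencies once and answers each query with a hand-written binary search (bisect_right), returning n - position.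
import Mathlib
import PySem

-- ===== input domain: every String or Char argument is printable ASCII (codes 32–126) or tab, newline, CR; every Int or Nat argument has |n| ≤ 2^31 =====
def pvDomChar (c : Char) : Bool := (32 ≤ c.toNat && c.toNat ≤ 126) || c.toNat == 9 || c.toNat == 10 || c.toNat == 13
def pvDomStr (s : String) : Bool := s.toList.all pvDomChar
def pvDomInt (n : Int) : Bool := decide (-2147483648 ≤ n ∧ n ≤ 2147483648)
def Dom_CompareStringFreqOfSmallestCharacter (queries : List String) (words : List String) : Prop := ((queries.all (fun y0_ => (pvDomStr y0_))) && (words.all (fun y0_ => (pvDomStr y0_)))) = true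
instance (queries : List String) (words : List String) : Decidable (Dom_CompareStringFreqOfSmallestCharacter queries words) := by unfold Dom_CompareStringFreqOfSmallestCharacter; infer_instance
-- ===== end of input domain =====

-- B sorts the word frequencies once and binary-searches (bisect_right) per query instead of A's nested scan.
-- (Equivalence of return values; neither function mutates its arguments.)


-- ===== PORT A =====
-- shared helper: s.count(min(s)) — identical expression in both Python sources.
-- min('') raises ValueError in Python (min? = none); that case is excluded by Pre_, the 0 is a dummy.
def minFreq (s : String) : Int :=
  match PySem.List.min? s.toList (fun c => c) with
  | some c => (PySem.Str.count s (String.ofList [c]) : Int)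
  | none => 0

def CompareStringFreqOfSmallestCharacter (queries : List String) (words : List String) : List Int :=
  let query_freqs := queries.map minFreq
  let word_freqs := words.map minFreq
  let result := List.replicate query_freqs.length (0 : Int)
  (PySem.List.enumerate query_freqs).foldl
    (fun result iq =>
      word_freqs.foldl
        (fun result w =>
          if iq.2 < w then
            -- result[i] += 1 ; the enumerate index iq.1 is ≥ 0 so .toNat is exact
            result.set iq.1.toNat (result.getD iq.1.toNat 0 + 1)
          else result)
        result)
    result

-- ===== PORT B =====
def CompareStringFreqOfSmallestCharacter_alt (queries : List String) (words : List String) : List Int :=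
  let word_freqs := PySem.List.sorted (words.map minFreq) (fun x => x) false
  let n := word_freqs.length
  -- Source B's _bisect_right is the textbook bisect_right loop = PySem.List.bisectRight
  queries.foldl
    (fun result s => result ++ [(n : Int) - (PySem.List.bisectRight word_freqs (minFreq s) : Int)])
    []

-- ===== PRECONDITION & SPEC =====
-- Pre_ excludes exactly the inputs with an empty string, on which Python's min('') raises ValueError (in A and in B alike).
def Pre_CompareStringFreqOfSmallestCharacter (queries : List String) (words : List String) : Prop :=
  (∀ s ∈ queries, s ≠ "") ∧ (∀ s ∈ words, s ≠ "")
instance (queries : List String) (words : List String) : Decidable (Pre_CompareStringFreqOfSmallestCharacter queries words) := by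
  unfold Pre_CompareStringFreqOfSmallestCharacter; infer_instance

def pvWitness_CompareStringFreqOfSmallestCharacter : List String × List String :=
  (["aba", "cc"], ["zzz", "ab", "b"])

def Spec_CompareStringFreqOfSmallestCharacter (queries : List String) (words : List String) (out : List Int) : Prop := out = CompareStringFreqOfSmallestCharacter_alt queries words
instance (queries : List String) (words : List String) (out : List Int) : Decidable (Spec_CompareStringFreqOfSmallestCharacter queries words out) := by unfold Spec_CompareStringFreqOfSmallestCharacter; infer_instance

-- ===== CLAIM (what is proved, stated in full; the proofs are below) =====
def Claim_equal_CompareStringFreqOfSmallestCharacter : Prop := ∀ (queries : List String) (words : List String), Dom_CompareStringFreqOfSmallestCharacter queries words → Pre_CompareStringFreqOfSmallestCharacter queries words → Spec_CompareStringFreqOfSmallestCharacter queries words (CompareStringFreqOfSmallestCharacter queries words)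

-- ===== LEMMAS AND PROOFS =====

-- A's inner loop: folding over word_freqs only increments slot i, by the number of w with q < w.
lemma inner_fold (wf : List Int) (q : Int) :
    ∀ (res : List Int) (i : Nat), i < res.length →
      wf.foldl (fun r w => if q < w then r.set i (r.getD i 0 + 1) else r) res
        = res.set i (res.getD i 0 + (wf.countP (fun w => decide (q < w)) : Int)) := by
  induction wf with
  | nil =>
      intro res i h
      simp [List.getD_eq_getElem?_getD, List.getElem?_eq_getElem h, List.set_getElem_self]
  | cons w wf ih =>
      intro res i h
      by_cases hw : q < w
      · have h' : i < (res.set i (res.getD i 0 + 1)).length := by simpa using h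
        simp only [List.foldl_cons, if_pos hw, ih _ _ h']
        rw [List.set_set]
        congr 1
        have : (res.set i (res.getD i 0 + 1)).getD i 0 = res.getD i 0 + 1 := by
          simp [List.getD_eq_getElem?_getD, h]
        rw [this, List.countP_cons, if_pos (by simpa using hw)]
        push_cast
        ring
      · simp only [List.foldl_cons, if_neg hw, ih _ _ h]
        rw [List.countP_cons, if_neg (by simpa using hw), Nat.add_zero]

-- A's outer loop over the enumerated query frequencies fills the result slots left to right.
lemma outer_fold (wf : List Int) :
    ∀ (qs : List Int) (pre : List Int),
      (PySem.List.enumerate qs (pre.length : Int)).foldl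
          (fun result iq =>
            wf.foldl
              (fun r w => if iq.2 < w then r.set iq.1.toNat (r.getD iq.1.toNat 0 + 1) else r)
              result)
          (pre ++ List.replicate qs.length (0 : Int))
        = pre ++ qs.map (fun q => (wf.countP (fun w => decide (q < w)) : Int)) := by
  intro qs
  induction qs with
  | nil => intro pre; simp [PySem.List.enumerate_nil]
  | cons q qs ih =>
      intro pre
      rw [PySem.List.enumerate_cons, List.foldl_cons]
      have hk : ((pre.length : Int)).toNat = pre.length := by simp
      have hlen : pre.length < (pre ++ List.replicate (q :: qs).length (0 : Int)).length := by
        simp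
      rw [inner_fold wf q _ _ (by simpa [hk] using hlen)]
      have hget : (pre ++ List.replicate (q :: qs).length (0 : Int)).getD
          ((pre.length : Int)).toNat 0 = 0 := by
        simp [hk, List.getD_eq_getElem?_getD]
      have hset : (pre ++ List.replicate (q :: qs).length (0 : Int)).set
            ((pre.length : Int)).toNat (0 + (wf.countP (fun w => decide (q < w)) : Int))
          = (pre ++ [(wf.countP (fun w => decide (q < w)) : Int)])
              ++ List.replicate qs.length (0 : Int) := by
        simp [hk, List.replicate_succ, List.append_assoc]
      rw [hget, hset]
      have harg : (pre.length : Int) + 1 = (((pre ++ [(wf.countP (fun w => decide (q < w)) : Int)]).length : Nat) : Int) := by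
        simp
      rw [harg, ih]
      simp

-- count of the w with q < w on a sorted list, via bisect_right.
lemma count_via_bisect (wf : List Int) (q : Int) :
    ((PySem.List.sorted wf (fun x => x) false).length : Int)
        - (PySem.List.bisectRight (PySem.List.sorted wf (fun x => x) false) q : Int)
      = (wf.countP (fun w => decide (q < w)) : Int) := by
  set fs := PySem.List.sorted wf (fun x => x) false with hfs
  have hsorted : fs.Pairwise (fun a b => a ≤ b) := by
    simpa using PySem.List.sorted_pairwise wf (fun x => x)
  obtain ⟨hle, hlo, hhi⟩ := PySem.List.bisectRight_spec fs q hsorted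
  set r := PySem.List.bisectRight fs q with hr
  -- countP over fs splits at index r
  have hsplit : fs = fs.take r ++ fs.drop r := (List.take_append_drop r fs).symm
  have htake : (fs.take r).countP (fun w => decide (q < w)) = 0 := by
    rw [List.countP_eq_zero]
    intro x hx
    obtain ⟨j, hj, rfl⟩ := List.mem_iff_getElem.mp hx
    have hj' : j < r := lt_of_lt_of_le hj (by simpa using List.length_take_le r fs)
    have hjf : j < fs.length := lt_of_lt_of_le hj (by simp)
    have := hlo j hjf hj'
    simp only [List.getElem_take]
    simpa using not_lt.mpr this
  have hdrop : (fs.drop r).countP (fun w => decide (q < w)) = (fs.drop r).length := by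
    rw [List.countP_eq_length]
    intro x hx
    obtain ⟨j, hj, rfl⟩ := List.mem_iff_getElem.mp hx
    have hjf : r + j < fs.length := by
      have := hj; simp only [List.length_drop] at this; omega
    have := hhi (r + j) hjf (Nat.le_add_right r j)
    simpa [List.getElem_drop] using this
  have hperm : fs.Perm wf := by simpa [hfs] using PySem.List.sorted_perm wf (fun x => x) false
  have hcount : wf.countP (fun w => decide (q < w)) = fs.length - r := by
    rw [← hperm.countP_eq]
    conv_lhs => rw [hsplit]
    rw [List.countP_append, htake, hdrop, List.length_drop, Nat.zero_add]
  rw [hcount]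
  omega

-- ===== VERDICT (by name: the statement is the Claim_ definition above) =====
theorem CompareStringFreqOfSmallestCharacter_spec : Claim_equal_CompareStringFreqOfSmallestCharacter := by
  intro queries words _ _
  unfold Spec_CompareStringFreqOfSmallestCharacter
  unfold CompareStringFreqOfSmallestCharacter CompareStringFreqOfSmallestCharacter_alt
  simp only []
  rw [PySem.List.foldl_append_singleton_eq_map]
  have hA := outer_fold (words.map minFreq) (queries.map minFreq) []
  simp only [List.length_nil, Nat.cast_zero, List.nil_append] at hA
  rw [hA, List.map_map]
  refine List.map_congr_left ?_
  intro s _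
  exact (count_via_bisect (words.map minFreq) (minFreq s)).symm
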